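-- pv_equiv track=rewrite | github.com/matheuzinn/MAC0214 | M.py | maximalize
-- ===== SOURCE A (Python) =====
-- def maximalize(text):
-- 	chrlist = sorted([c for c in text])
-- 	la,continue_twice = False,False
-- 	maximalized_text = ""
-- 	for i in range(len(chrlist)-1,0,-1):
-- 		if(continue_twice):
-- 			continue_twice = False
-- 			continue
-- 		if(chrlist[i]==chrlist[i-1] and chrlist[i]!="z"):
-- 			maximalized_text+=chr(ord(chrlist[i])+1)
-- 			continue_twice = True
-- 			if(i==1):
-- 				la = True
-- 			continue
-- 		maximalized_text+=chrlist[i]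
-- 	if(not la):
-- 		maximalized_text += chrlist[0]
-- 	return(maximalized_text)
-- ===== SOURCE B (Python) =====
-- def maximalize(text):
--     counts = {}
--     for c in text:
--         counts[c] = counts.get(c, 0) + 1
--     pieces = []
--     for ch in sorted(counts, reverse=True):
--         m = counts[ch]
--         if ch != 'z':
--             pieces.append(chr(ord(ch) + 1) * (m // 2) + ch * (m % 2))
--         else:
--             pieces.append(ch * m)
--     return "".join(pieces)
-- ===== Notes on version B (the rewrite author's own statement) =====
-- stated objective: simpler
-- what changed: Replaces A's backward index scan with continue-twice/la flag state over the sorted character list by a frequency map: for each distinct character in descending order, emit floor(m/2) incremented characters and m%2 leftovers ('z' never combines), then join; constant-factor speedup since only distinct characters are sorted and each group costs O(1) arithmetic instead of a per-pair interpreted scan.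
-- outside the precondition, e.g. on maximalize(''): A raises IndexError, B returns ''
import Mathlib
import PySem

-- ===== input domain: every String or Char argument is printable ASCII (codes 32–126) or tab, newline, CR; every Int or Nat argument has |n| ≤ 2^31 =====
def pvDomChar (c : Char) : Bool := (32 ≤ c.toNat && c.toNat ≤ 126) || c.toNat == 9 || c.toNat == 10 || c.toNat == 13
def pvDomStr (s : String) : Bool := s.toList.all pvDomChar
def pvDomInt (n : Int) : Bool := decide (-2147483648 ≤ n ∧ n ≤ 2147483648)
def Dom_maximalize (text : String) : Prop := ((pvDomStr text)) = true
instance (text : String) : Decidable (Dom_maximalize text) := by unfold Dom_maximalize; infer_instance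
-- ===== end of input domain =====

-- B replaces A's backward adjacent-pair scan (continue-twice/la flag state) by per-character
-- frequency arithmetic: for each distinct character in descending order, m//2 incremented
-- characters and m%2 leftovers ('z' never combines). Objective: simpler.

-- ===== PORT A =====
-- A's for-loop as structural recursion over the range list; state = (la, continue_twice, maximalized_text)
def maxLoop (chrlist : List Char) : List Int → Bool × Bool × List Char → Bool × Bool × List Char
  | [], st => st
  | i :: rest, (la, ct, acc) =>
    if ct then
      maxLoop chrlist rest (la, false, acc)
    else if PySem.List.pyGetD chrlist i ' ' = PySem.List.pyGetD chrlist (i-1) ' ' ∧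
            PySem.List.pyGetD chrlist i ' ' ≠ 'z' then
      -- indices i and i-1 are always in range here (i ∈ range(len-1, 0, -1)), so pyGetD is exact
      maxLoop chrlist rest ((if i = 1 then true else la), true,
        acc ++ [Char.ofNat ((PySem.List.pyGetD chrlist i ' ').toNat + 1)])
    else
      maxLoop chrlist rest (la, ct, acc ++ [PySem.List.pyGetD chrlist i ' '])

def maximalize (text : String) : String :=
  let chrlist := PySem.List.sorted text.toList (fun c => c) false
  let st := maxLoop chrlist (PySem.List.pyRange ((chrlist.length : Int) - 1) 0 (-1)) (false, false, [])
  -- chrlist[0] raises IndexError on the empty string: excluded by Pre_maximalize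
  let out := if st.1 = false then st.2.2 ++ [PySem.List.pyGetD chrlist 0 ' '] else st.2.2
  String.ofList out

-- ===== PORT B =====
def maximalize_alt (text : String) : String :=
  let counts := text.toList.foldl (fun (d : PySem.Dict Char Int) c => d.insert c (d.getD c 0 + 1)) PySem.Dict.empty
  let pieces := (PySem.List.sorted counts.keys (fun x => x) true).map (fun ch =>
    let m := counts.getD ch 0
    if ch ≠ 'z' then
      List.replicate (PySem.Int.floordiv m 2).toNat (Char.ofNat (ch.toNat + 1)) ++
        List.replicate (PySem.Int.mod m 2).toNat ch
    else
      List.replicate m.toNat ch)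
  String.ofList pieces.flatten

-- ===== PRECONDITION & SPEC =====
-- Pre_ excludes only the empty string, on which A raises IndexError (chrlist[0]); B returns "" there.
def Pre_maximalize (text : String) : Prop := text ≠ ""
instance (text : String) : Decidable (Pre_maximalize text) := by unfold Pre_maximalize; infer_instance
def pvWitness_maximalize : String := "abba"

def Spec_maximalize (text : String) (out : String) : Prop := out = maximalize_alt text
instance (text : String) (out : String) : Decidable (Spec_maximalize text out) := by unfold Spec_maximalize; infer_instance

-- ===== CLAIM (what is proved, stated in full; the proofs are below) =====
def Claim_equal_maximalize : Prop := ∀ (text : String), Dom_maximalize text → Pre_maximalize text → Spec_maximalize text (maximalize text)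

-- ===== LEMMAS AND PROOFS =====

-- chr(ord(c)+1)
def succC (c : Char) : Char := Char.ofNat (c.toNat + 1)

-- A's loop, re-read as a recursion over the DESCENDING character list:
-- the characters the loop emits, plus whether the merge at i=1 consumed the last element (la)
def fp : List Char → List Char × Bool
  | [] => ([], false)
  | [_] => ([], false)
  | a :: b :: t =>
    if a = b ∧ a ≠ 'z' then
      match t with
      | [] => ([succC a], true)
      | _ :: _ => (succC a :: (fp t).1, (fp t).2)
    else
      (a :: (fp (b :: t)).1, (fp (b :: t)).2)

-- the whole of A after the loop: greedy adjacent merging on the descending list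
def fFull : List Char → List Char
  | [] => []
  | [a] => [a]
  | a :: b :: t =>
    if a = b ∧ a ≠ 'z' then succC a :: fFull t
    else a :: fFull (b :: t)

-- the piece B emits for a character of multiplicity m (Nat form of B's arithmetic)
def pieceN (c : Char) (m : Nat) : List Char :=
  if c ≠ 'z' then List.replicate (m / 2) (succC c) ++ List.replicate (m % 2) c
  else List.replicate m c

lemma take_succ_reverse (cl : List Char) (k : Nat) (h : k < cl.length) :
    (cl.take (k+1)).reverse = cl[k] :: (cl.take k).reverse := by
  rw [List.take_add_one]
  simp [List.getElem?_eq_getElem h]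

lemma getD_nat (cl : List Char) (k : Nat) (h : k < cl.length) :
    PySem.List.pyGetD cl (k : Int) ' ' = cl[k] := by
  rw [PySem.List.pyGetD_natCast, List.getD_eq_getElem?_getD, List.getElem?_eq_getElem h]
  rfl

lemma fp_full (d : List Char) (h : d ≠ []) :
    fFull d = (fp d).1 ++ (if (fp d).2 then [] else [d.getLast h]) := by
  induction d using fFull.induct with
  | case1 => simp at h
  | case2 a => simp [fFull, fp]
  | case3 a b t hc ih =>
    match t, ih with
    | [], _ =>
      obtain ⟨rfl, hz⟩ := hc
      simp [fFull, fp, hz]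
    | x :: t', ih =>
      simp only [fFull, fp, if_pos hc]
      rw [ih (by simp)]
      simp [List.getLast_cons]
  | case4 a b t hc ih =>
    simp only [fFull, fp, if_neg hc]
    rw [ih (by simp)]
    simp [List.getLast_cons]

lemma maxLoop_eq (cl : List Char) : ∀ (k : Nat), k < cl.length → ∀ (la : Bool) (acc : List Char),
    maxLoop cl (PySem.List.pyRange (k : Int) 0 (-1)) (la, false, acc)
      = (la || (fp ((cl.take (k+1)).reverse)).2, (fp ((cl.take (k+1)).reverse)).2,
          acc ++ (fp ((cl.take (k+1)).reverse)).1) := by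
  intro k
  induction k using Nat.strong_induction_on with
  | _ k ih =>
    intro hk la acc
    match k with
    | 0 =>
      rw [PySem.List.pyRange_neg_one_eq_nil (by omega), take_succ_reverse cl 0 hk]
      simp [maxLoop, fp]
    | (m+1) =>
      rw [PySem.List.pyRange_neg_one_cons (by omega)]
      have hcast : ((m+1 : Nat) : Int) - 1 = (m : Nat) := by push_cast; ring
      have hmlt : m < cl.length := by omega
      rw [take_succ_reverse cl (m+1) hk, take_succ_reverse cl m hmlt]
      simp only [maxLoop, Bool.false_eq_true, if_false, hcast,
        getD_nat cl (m+1) hk, getD_nat cl m hmlt]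
      by_cases hc : cl[m+1] = cl[m] ∧ cl[m+1] ≠ 'z'
      · rw [if_pos hc]
        match m, hmlt with
        | 0, hmlt =>
          rw [if_pos (by norm_num), PySem.List.pyRange_neg_one_eq_nil (by omega)]
          obtain ⟨heq, hz⟩ := hc
          have hz0 : cl[0] ≠ 'z' := heq ▸ hz
          simp [maxLoop, fp, heq, hz0, succC]
        | (m'+1), hmlt =>
          rw [if_neg (by omega : ¬ ((m'+1+1 : Nat) : Int) = 1)]
          rw [PySem.List.pyRange_neg_one_cons (by omega)]
          simp only [maxLoop, if_true]
          have hcast2 : ((m'+1 : Nat) : Int) - 1 = (m' : Nat) := by push_cast; ring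
          rw [hcast2, ih m' (by omega) (by omega) la (acc ++ [Char.ofNat (cl[m'+1+1].toNat + 1)])]
          have hne : (cl.take (m'+1)).reverse ≠ [] := by
            apply List.ne_nil_of_length_pos
            simp
            omega
          obtain ⟨x, t', ht⟩ := List.exists_cons_of_ne_nil hne
          rw [ht]
          simp only [fp, if_pos hc, succC]
          simp
      · rw [if_neg hc]
        rw [ih m (by omega) hmlt la (acc ++ [cl[m+1]])]
        rw [take_succ_reverse cl m hmlt]
        simp only [fp, if_neg hc]
        simp

lemma maximalize_char (text : String) (h : text.toList ≠ []) :
    maximalize text = String.ofList (fFull ((PySem.List.sorted text.toList (fun c => c) false).reverse)) := by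
  have hclne : PySem.List.sorted text.toList (fun c => c) false ≠ [] := by
    rw [Ne, PySem.List.sorted_eq_nil_iff]
    exact h
  set cl := PySem.List.sorted text.toList (fun c => c) false with hcl
  have hlen : 0 < cl.length := List.length_pos_of_ne_nil hclne
  have hcast : ((cl.length : Int) - 1) = ((cl.length - 1 : Nat) : Int) := by omega
  have htake : cl.take (cl.length - 1 + 1) = cl := by
    rw [Nat.sub_add_cancel hlen, List.take_length]
  have hrevne : cl.reverse ≠ [] := by simpa using hclne
  simp only [maximalize, ← hcl, hcast,
    maxLoop_eq cl (cl.length - 1) (by omega) false [], htake, Bool.false_or, List.nil_append]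
  rw [fp_full cl.reverse hrevne]
  rw [List.getLast_reverse, List.head_eq_getElem]
  cases hb : (fp cl.reverse).2 <;>
    simp [hb, PySem.List.pyGetD_zero, List.getD_eq_getElem?_getD, List.getElem?_eq_getElem hlen]

lemma group_piece (c : Char) : ∀ (m : Nat) (rest : List Char), (∀ x ∈ rest, x < c) →
    fFull (List.replicate m c ++ rest) = pieceN c m ++ fFull rest := by
  intro m
  induction m using Nat.strong_induction_on with
  | _ m ih =>
    intro rest hr
    match m with
    | 0 => simp [pieceN]
    | 1 =>
      simp only [List.replicate_one, List.cons_append, List.nil_append]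
      have hp : pieceN c 1 = [c] := by
        by_cases hz : c = 'z' <;> simp [pieceN, hz]
      rw [hp]
      match rest, hr with
      | [], _ => simp [fFull]
      | r :: t, hr =>
        have : ¬ (c = r ∧ c ≠ 'z') := by
          rintro ⟨rfl, -⟩
          exact absurd (hr c (by simp)) (lt_irrefl _)
        simp [fFull, this]
    | (m+2) =>
      by_cases hz : c = 'z'
      · subst hz
        have h2 : List.replicate (m+1) 'z' ++ rest = 'z' :: (List.replicate m 'z' ++ rest) := by
          simp [List.replicate_succ]
        rw [show List.replicate (m+2) 'z' ++ rest = 'z' :: (List.replicate (m+1) 'z' ++ rest) by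
          simp [List.replicate_succ]]
        rw [h2]
        have hznm : ¬ ('z' = 'z' ∧ 'z' ≠ 'z') := by simp
        rw [show fFull ('z' :: 'z' :: (List.replicate m 'z' ++ rest))
            = 'z' :: fFull ('z' :: (List.replicate m 'z' ++ rest)) by simp [fFull, hznm]]
        rw [← h2, ih (m+1) (by omega) rest hr]
        simp [pieceN, List.replicate_succ]
      · rw [show List.replicate (m+2) c ++ rest = c :: c :: (List.replicate m c ++ rest) by
          simp [List.replicate_succ]]
        rw [show fFull (c :: c :: (List.replicate m c ++ rest))
            = succC c :: fFull (List.replicate m c ++ rest) by simp [fFull, hz]]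
        rw [ih m (by omega) rest hr]
        have hpm : pieceN c (m+2) = succC c :: pieceN c m := by
          simp only [pieceN, if_pos (by exact hz : c ≠ 'z')]
          rw [show (m+2)/2 = m/2 + 1 by omega, show (m+2)%2 = m%2 by omega, List.replicate_succ]
          simp
        rw [hpm]
        simp

lemma chain_piece (cnt : Char → Nat) : ∀ (K : List Char), K.Pairwise (· > ·) →
    fFull (K.flatMap (fun c => List.replicate (cnt c) c)) = (K.map (fun c => pieceN c (cnt c))).flatten := by
  intro K
  induction K with
  | nil => intro _; simp [fFull]
  | cons c K' ih =>
    intro hp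
    rw [List.pairwise_cons] at hp
    have hrest : ∀ x ∈ K'.flatMap (fun c => List.replicate (cnt c) c), x < c := by
      intro x hx
      rw [List.mem_flatMap] at hx
      obtain ⟨c', hc', hx⟩ := hx
      rw [List.eq_of_mem_replicate hx]
      exact hp.1 c' hc'
    rw [List.flatMap_cons, group_piece c (cnt c) _ hrest, ih hp.2]
    simp

lemma count_flat (s : List Char) (a : Char) : ∀ (K : List Char), K.Nodup →
    (K.flatMap (fun c => List.replicate (s.count c) c)).count a = if a ∈ K then s.count a else 0 := by
  intro K
  induction K with
  | nil => simp
  | cons c K' ih =>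
    intro hn
    rw [List.nodup_cons] at hn
    rw [List.flatMap_cons, List.count_append, ih hn.2, List.count_replicate]
    by_cases hac : a = c
    · subst hac
      simp [hn.1]
    · simp [hac, Ne.symm hac]

lemma flat_pairwise_ge (s : List Char) : ∀ (K : List Char), K.Pairwise (· > ·) →
    (K.flatMap (fun c => List.replicate (s.count c) c)).Pairwise (· ≥ ·) := by
  intro K
  induction K with
  | nil => simp
  | cons c K' ih =>
    intro hp
    rw [List.pairwise_cons] at hp
    rw [List.flatMap_cons, List.pairwise_append]
    refine ⟨List.pairwise_replicate.mpr (by simp), ih hp.2, ?_⟩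
    intro x hx y hy
    rw [List.eq_of_mem_replicate hx]
    rw [List.mem_flatMap] at hy
    obtain ⟨c', hc', hy⟩ := hy
    rw [List.eq_of_mem_replicate hy]
    exact le_of_lt (hp.1 c' hc')

-- the descending distinct-character list B sorts is strictly decreasing
lemma sortedDesc_gt (s : List Char) :
    (PySem.List.sorted (PySem.Set.ofList s) (fun x => x) true).Pairwise (· > ·) := by
  have hnd : (PySem.List.sorted (PySem.Set.ofList s) (fun x => x) true).Nodup :=
    (PySem.List.sorted_perm _ _ _).symm.nodup (PySem.Set.nodup_ofList s)
  have hge : (PySem.List.sorted (PySem.Set.ofList s) (fun x => x) true).Pairwise (fun a b => b ≤ a) :=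
    PySem.List.sorted_pairwise_rev _ _
  refine (hge.and hnd).imp ?_
  rintro a b ⟨h1, h2⟩
  exact lt_of_le_of_ne h1 (Ne.symm h2)

-- A's descending sorted list is exactly B's groups, concatenated
lemma desc_flat (s : List Char) :
    (PySem.List.sorted s (fun c => c) false).reverse
      = (PySem.List.sorted (PySem.Set.ofList s) (fun x => x) true).flatMap
          (fun c => List.replicate (s.count c) c) := by
  set K := PySem.List.sorted (PySem.Set.ofList s) (fun x => x) true with hK
  have hnd : K.Nodup := (PySem.List.sorted_perm _ _ _).symm.nodup (PySem.Set.nodup_ofList s)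
  have hgt : K.Pairwise (· > ·) := sortedDesc_gt s
  have hmemK : ∀ a, a ∈ K ↔ a ∈ s := by
    intro a
    rw [hK, PySem.List.mem_sorted, PySem.Set.mem_ofList]
  have hperm : (K.flatMap (fun c => List.replicate (s.count c) c)).Perm s := by
    rw [List.perm_iff_count]
    intro a
    rw [count_flat s a K hnd]
    by_cases ha : a ∈ s
    · simp [(hmemK a).mpr ha]
    · have hK' : a ∉ K := fun h => ha ((hmemK a).mp h)
      simp [hK', List.count_eq_zero_of_not_mem ha]
  have hperm2 : ((PySem.List.sorted s (fun c => c) false).reverse).Perm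
      (K.flatMap (fun c => List.replicate (s.count c) c)) :=
    ((List.reverse_perm _).trans (PySem.List.sorted_perm _ _ _)).trans hperm.symm
  have hsort1 : ((PySem.List.sorted s (fun c => c) false).reverse).Pairwise (· ≥ ·) := by
    rw [List.pairwise_reverse]
    exact PySem.List.sorted_pairwise _ _
  have hsort2 : (K.flatMap (fun c => List.replicate (s.count c) c)).Pairwise (· ≥ ·) :=
    flat_pairwise_ge s K hgt
  exact List.Perm.eq_of_pairwise (fun a b _ _ h1 h2 => le_antisymm h2 h1) hsort1 hsort2 hperm2

lemma maximalize_alt_char (text : String) :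
    maximalize_alt text = String.ofList
      (((PySem.List.sorted (PySem.Set.ofList text.toList) (fun x => x) true).map
        (fun c => pieceN c (text.toList.count c))).flatten) := by
  simp only [maximalize_alt, PySem.Dict.foldl_insert_getD_add_one_eq_counter,
    PySem.Dict.keys_counter]
  congr 1
  congr 1
  apply List.map_congr_left
  intro c _
  rw [PySem.Dict.getD_counter]
  unfold pieceN succC
  have h1 : ∀ m : Nat, ((m : Int) / 2).toNat = m / 2 := by intro m; omega
  have h2 : ∀ m : Nat, ((m : Int) % 2).toNat = m % 2 := by intro m; omega
  by_cases hz : c = 'z' <;>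
    simp [hz, PySem.Int.floordiv_natCast, PySem.Int.mod_natCast, h1, h2]

-- ===== VERDICT (by name: the statement is the Claim_ definition above) =====
theorem maximalize_spec : Claim_equal_maximalize := by
  intro text _ hpre
  unfold Spec_maximalize
  have h : text.toList ≠ [] := fun hnil => hpre (String.toList_eq_nil_iff.mp hnil)
  rw [maximalize_char text h, maximalize_alt_char text, desc_flat,
    chain_piece (fun c => text.toList.count c) _ (sortedDesc_gt text.toList)]
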